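-- pv_equiv track=rewrite | github.com/sanghunBaek/algorithm | algorithm/baekjoon/55_4948.py | checkCS
-- ===== SOURCE A (Python) =====
-- num = [x for x in range(1, 2 *123456 + 1)]
--
-- def checkCS(n):
--     count = 0
--     for l in num:
--         if l > 2*n:
--             return count
--
--         if l!=1 and n<l:
--             count += 1
--     return count
-- ===== SOURCE B (Python) =====
-- def checkCS(n):
--     # closed form: A counts the integers l in (n, 2n] with l != 1,
--     # scanning the precomputed list 1..246912 (so capped at 246912).
--     if n <= 0:
--         return 0
--     if n <= 123456:
--         return n
--     return max(0, 246912 - n)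
-- ===== Notes on version B (the rewrite author's own statement) =====
-- stated objective: faster
-- what changed: Replaces the linear scan over the precomputed list 1..246912 by an O(1) closed form: 0 for n<=0, n for 1<=n<=123456, max(0, 246912-n) above.
import Mathlib
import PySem

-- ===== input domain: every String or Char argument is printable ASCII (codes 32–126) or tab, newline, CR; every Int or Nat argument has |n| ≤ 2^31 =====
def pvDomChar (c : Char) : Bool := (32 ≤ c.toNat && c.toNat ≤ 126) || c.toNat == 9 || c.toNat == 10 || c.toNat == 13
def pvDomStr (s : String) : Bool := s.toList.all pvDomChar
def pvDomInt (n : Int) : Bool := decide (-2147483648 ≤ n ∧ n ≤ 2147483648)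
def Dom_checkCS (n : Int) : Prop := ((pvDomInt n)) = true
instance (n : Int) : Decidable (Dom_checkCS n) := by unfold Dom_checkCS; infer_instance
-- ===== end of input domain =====

-- B replaces A's linear scan of the precomputed list 1..246912 by an O(1) closed form.

-- ===== PORT A =====
-- module-level: num = [x for x in range(1, 2*123456 + 1)]
def numA : List Int := PySem.List.pyRange 1 (2 * 123456 + 1) 1

-- the for-loop with its early return, as structural recursion over the list
def loopA (n : Int) : List Int → Int → Int
  | [], count => count
  | l :: ls, count =>
    if l > 2 * n then count
    else loopA n ls (if l ≠ 1 ∧ n < l then count + 1 else count)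

def checkCS (n : Int) : Int := loopA n numA 0

-- ===== PORT B =====
def checkCS_alt (n : Int) : Int :=
  if n ≤ 0 then 0
  else if n ≤ 123456 then n
  else max 0 (246912 - n)

-- ===== PRECONDITION & SPEC =====
def Spec_checkCS (n : Int) (out : Int) : Prop := out = checkCS_alt n
instance (n : Int) (out : Int) : Decidable (Spec_checkCS n out) := by unfold Spec_checkCS; infer_instance

-- ===== CLAIM (what is proved, stated in full; the proofs are below) =====
def Claim_equal_checkCS : Prop := ∀ (n : Int), Dom_checkCS n → Spec_checkCS n (checkCS n)

-- ===== LEMMAS AND PROOFS =====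

-- loopA over an ascending range starting at a ≥ 2 adds the size of (n, 2n] ∩ [a, a+k-1]
theorem loopA_range (n : Int) (k : Nat) : ∀ (a count : Int), 2 ≤ a →
    loopA n (PySem.List.pyRange a (a + k) 1) count
      = count + max 0 (min (2 * n) (a + k - 1) - max n (a - 1)) := by
  induction k with
  | zero =>
    intro a count _
    rw [show a + (0 : Nat) = a by omega, PySem.List.pyRange_one_eq_nil (le_refl a)]
    simp only [loopA]; omega
  | succ k ih =>
    intro a count ha
    have hlt : a < a + (k + 1 : Nat) := by omega
    rw [PySem.List.pyRange_one_cons hlt]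
    simp only [loopA]
    by_cases h2 : a > 2 * n
    · simp only [if_pos h2]; omega
    · rw [if_neg h2]
      rw [show (a + (k + 1 : Nat) : Int) = (a + 1) + (k : Nat) by push_cast; ring]
      rw [ih (a + 1) _ (by omega)]
      by_cases hc : a ≠ 1 ∧ n < a
      · rw [if_pos hc]; omega
      · rw [if_neg hc]
        have : ¬ n < a := by
          rcases not_and_or.mp hc with h | h
          · exact absurd (by omega : a ≠ 1) h
          · exact h
        omega

-- ===== VERDICT (by name: the statement is the Claim_ definition above) =====
theorem checkCS_spec : Claim_equal_checkCS := by
  intro n _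
  unfold Spec_checkCS checkCS numA
  rw [show (2 * 123456 + 1 : Int) = 1 + (246912 : Nat) by norm_num,
    PySem.List.pyRange_one_cons (by omega : (1 : Int) < 1 + (246912 : Nat))]
  simp only [loopA]
  by_cases h0 : (1 : Int) > 2 * n
  · rw [if_pos h0]
    unfold checkCS_alt
    rw [if_pos (by omega : n ≤ 0)]
  · rw [if_neg h0]
    rw [if_neg (by simp : ¬ ((1 : Int) ≠ 1 ∧ n < 1))]
    rw [show ((1 : Int) + 1) = 2 by norm_num,
      show (1 + (246912 : Nat) : Int) = 2 + (246911 : Nat) by norm_num]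
    rw [loopA_range n 246911 2 0 (by omega)]
    unfold checkCS_alt
    have hn : 1 ≤ n := by omega
    split_ifs <;> push_cast <;> omega
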